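-- pv_equiv track=rewrite | github.com/voicegain/platform | grammars/generate/from-examples/grammargenerator.py | generateBaseGrammar
-- ===== SOURCE A (Python) =====
-- from collections import defaultdict
--
-- def generateBaseGrammar(sentences):
--
--
--   class TreeNode:
--       def __init__(self):
--           self.children = defaultdict(TreeNode)
--           self.is_end = False
--
--   def add_sentence(root, sentence):
--       node = root
--       for word in sentence.split():
--           node = node.children[word]
--       node.is_end = True
--
--   def find_common_suffix(branches):
--       split_branches = [branch.split() for branch in branches]
--       reversed_branches = list(zip(*[reversed(branch) for branch in split_branches]))
--
--       common_suffix = []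
--       for words in reversed_branches:
--           if len(set(words)) == 1:
--               common_suffix.append(words[0])
--           else:
--               break
--       common_suffix.reverse()
--
--       common_length = len(common_suffix)
--       stripped_branches = [' '.join(branch.split()[:-common_length]) if common_length > 0 else branch for branch in branches]
--
--       return common_suffix, stripped_branches
--
--   def generate_grammar(node):
--       if not node.children:
--           return ""
--
--       branches = []
--       for word, child in node.children.items():
--           sub_grammar = generate_grammar(child)
--           if sub_grammar:
--               branch = f"{word} {sub_grammar}".strip()
--           else:
--               branch = word
--           branches.append(branch)
--
--       common_suffix, stripped_branches = find_common_suffix(branches)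
--       if common_suffix:
--           common_suffix_str = ' '.join(common_suffix)
--           branches = stripped_branches
--
--       if len(branches) == 1:
--           combined_branch = branches[0]
--       else:
--           combined_branch = "(" + " | ".join(branches) + ")"
--
--       if common_suffix:
--           combined_branch += " " + common_suffix_str
--
--       # Handle optional elements in brackets for more compact grammar
--       if len(branches) == 2 and branches[0] == '':
--           combined_branch = f"[{branches[1]}]" + " " + common_suffix_str
--
--       return combined_branch
--
--   def sentences_to_grammar(sentences):
--       root = TreeNode()
--       for sentence in sentences:
--           add_sentence(root, sentence)
--
--       return generate_grammar(root)
--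
--
--   grammar = sentences_to_grammar(sentences)
--   return grammar
-- ===== SOURCE B (Python) =====
-- def generateBaseGrammar(sentences):
--
--     def find_common_suffix(branches):
--         split_branches = [branch.split() for branch in branches]
--         reversed_branches = list(zip(*[reversed(branch) for branch in split_branches]))
--
--         common_suffix = []
--         for words in reversed_branches:
--             if len(set(words)) == 1:
--                 common_suffix.append(words[0])
--             else:
--                 break
--         common_suffix.reverse()
--
--         common_length = len(common_suffix)
--         stripped_branches = [' '.join(branch.split()[:-common_length]) if common_length > 0 else branch for branch in branches]
--
--         return common_suffix, stripped_branches
--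
--     def combine(branches):
--         common_suffix, stripped_branches = find_common_suffix(branches)
--         if common_suffix:
--             common_suffix_str = ' '.join(common_suffix)
--             branches = stripped_branches
--
--         if len(branches) == 1:
--             combined_branch = branches[0]
--         else:
--             combined_branch = "(" + " | ".join(branches) + ")"
--
--         if common_suffix:
--             combined_branch += " " + common_suffix_str
--
--         if len(branches) == 2 and branches[0] == '':
--             combined_branch = f"[{branches[1]}]" + " " + common_suffix_str
--
--         return combined_branch
--
--     # No trie: recursively render the list of (non-empty) token sequences,
--     # grouping by first token in first-appearance order.
--     def render(seqs):
--         if not seqs: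
--             return ""
--         order = []
--         groups = {}
--         for seq in seqs:
--             w = seq[0]
--             if w not in groups:
--                 groups[w] = []
--                 order.append(w)
--             if len(seq) > 1:
--                 groups[w].append(seq[1:])
--         branches = []
--         for w in order:
--             sub = render(groups[w])
--             branches.append(f"{w} {sub}".strip() if sub else w)
--         return combine(branches)
--
--     return render([t for t in (s.split() for s in sentences) if t])
-- ===== Notes on version B (the rewrite author's own statement) =====
-- stated objective: simpler
-- what changed: B never builds A's TreeNode trie: it recursively renders the list of token sequences directly, grouping them by first token in first-appearance order and rendering each group's non-empty tails, then applies the same suffix-factoring/join/bracket logic to the branches.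
import Mathlib
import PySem

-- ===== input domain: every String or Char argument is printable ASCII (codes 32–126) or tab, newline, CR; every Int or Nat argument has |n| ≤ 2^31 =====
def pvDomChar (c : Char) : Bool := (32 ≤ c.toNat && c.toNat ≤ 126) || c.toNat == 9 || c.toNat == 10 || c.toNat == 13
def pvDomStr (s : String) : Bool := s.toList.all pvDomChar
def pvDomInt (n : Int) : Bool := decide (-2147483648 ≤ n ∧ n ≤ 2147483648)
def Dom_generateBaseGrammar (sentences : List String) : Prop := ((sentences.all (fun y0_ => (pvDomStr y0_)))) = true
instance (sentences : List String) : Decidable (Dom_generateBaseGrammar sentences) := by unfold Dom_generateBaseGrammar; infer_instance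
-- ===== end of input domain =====

-- B drops A's TreeNode trie: it renders the token sequences directly, grouping by first token
-- in first-appearance order (objective: simpler — no tree is ever built).

-- ===== SHARED HELPERS (this helper code is textually identical in Source A and Source B) =====

-- zip(*xss): tuples while every iterable still has an element (ported by hand; exact: stops at the shortest)
def pyZip {α : Type} [Inhabited α] : List (List α) → List (List α)
  | [] => []
  | l₀ :: ls =>
    if h : ((l₀ :: ls).all (fun l => !l.isEmpty)) then
      ((l₀ :: ls).map (·.head!)) :: pyZip ((l₀ :: ls).map (·.tail))
    else []
termination_by ls => (ls.headD []).length
decreasing_by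
  simp only [List.map_cons, List.headD_cons]
  have : l₀.isEmpty = false := by simp only [List.all_cons, Bool.and_eq_true, Bool.not_eq_true'] at h; exact h.1
  cases l₀ with
  | nil => simp at this
  | cons a as => simp [List.tail]

-- the 'for words in reversed_branches: if len(set(words)) == 1: append words[0] else: break' loop
def csLoop : List (List String) → List String
  | [] => []
  | ws :: rest =>
    if (PySem.Set.ofList ws).length = 1 then ws.head! :: csLoop rest else []

-- find_common_suffix of Source A / Source B
def findCommonSuffix (branches : List String) : List String × List String :=
  let splitBranches := branches.map PySem.Str.split₀
  let reversedBranches := pyZip (splitBranches.map List.reverse)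
  let commonSuffix := (csLoop reversedBranches).reverse
  let commonLength := commonSuffix.length
  let strippedBranches := branches.map (fun branch =>
    if commonLength > 0 then
      PySem.Str.join " " (PySem.List.slice (PySem.Str.split₀ branch) none (some (-(commonLength : Int))))
    else branch)
  (commonSuffix, strippedBranches)

-- the tail of generate_grammar (Source A) = combine (Source B): suffix factoring, '(|)' join, '[optional]'
def combineBranches (branches : List String) : String :=
  let p := findCommonSuffix branches
  let commonSuffix := p.1
  let commonSuffixStr := PySem.Str.join " " commonSuffix   -- in Python assigned only when suffix ≠ []; only used then
  let branches' := if commonSuffix ≠ [] then p.2 else branches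
  let combined :=
    if branches'.length = 1 then branches'.headD ""
    else "(" ++ PySem.Str.join " | " branches' ++ ")"
  let combined := if commonSuffix ≠ [] then combined ++ " " ++ commonSuffixStr else combined
  if branches'.length = 2 ∧ branches'.headD "" = "" then
    "[" ++ (branches'.getD 1 "") ++ "]" ++ " " ++ commonSuffixStr
  else combined

-- ===== PORT A =====

-- class TreeNode: children (defaultdict, insertion order) + is_end (write-only flag)
mutual
inductive PvTree : Type where
  | mk : Bool → PvForest → PvTree
inductive PvForest : Type where
  | nil : PvForest
  | cons : String → PvTree → PvForest → PvForest
end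

-- node.children[word] of a defaultdict: update in place if present, else append a fresh child
def updateChild (f : PvForest) (w : String) (g : PvTree → PvTree) : PvForest :=
  match f with
  | PvForest.nil => PvForest.cons w (g (PvTree.mk false PvForest.nil)) PvForest.nil
  | PvForest.cons k t rest =>
    if k = w then PvForest.cons k (g t) rest else PvForest.cons k t (updateChild rest w g)

-- add_sentence: descend through children[word] for each word, set is_end at the end
def addWords : PvTree → List String → PvTree
  | PvTree.mk _ f, [] => PvTree.mk true f
  | PvTree.mk e f, w :: ws => PvTree.mk e (updateChild f w (fun t => addWords t ws))

-- generate_grammar: "" on a leaf, else build the branch list and combine it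
mutual
def genGrammar : PvTree → String
  | PvTree.mk _ PvForest.nil => ""
  | PvTree.mk _ (PvForest.cons w t rest) => combineBranches (branchesOf (PvForest.cons w t rest))
def branchesOf : PvForest → List String
  | PvForest.nil => []
  | PvForest.cons w t rest =>
    (let sub := genGrammar t
     if sub = "" then w else PySem.Str.strip (w ++ " " ++ sub)) :: branchesOf rest
end

def generateBaseGrammar (sentences : List String) : String :=
  genGrammar (sentences.foldl (fun root s => addWords root (PySem.Str.split₀ s)) (PvTree.mk false PvForest.nil))

-- ===== PORT B =====

-- measure used only for render's termination
def pvTotalLen (seqs : List (List String)) : Nat := (seqs.map (fun s => s.length + 1)).sum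
def pvTotalLenG (g : List (String × List (List String))) : Nat := (g.map (fun p => pvTotalLen p.2 + 1)).sum

-- groups[w].append(tail) / fresh key at the end (order list + dict, as one assoc list)
def addGroup : List (String × List (List String)) → String → List String → List (String × List (List String))
  | [], w, t => [(w, if t.isEmpty then [] else [t])]
  | (k, ts) :: rest, w, t =>
    if k = w then (k, if t.isEmpty then ts else ts ++ [t]) :: rest
    else (k, ts) :: addGroup rest w t

-- one iteration of Source B's grouping loop
def groupStep (acc : List (String × List (List String))) (seq : List String) : List (String × List (List String)) :=
  match seq with
  | [] => acc
  | w :: t => addGroup acc w t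

def groupByFirst (seqs : List (List String)) : List (String × List (List String)) :=
  seqs.foldl groupStep []

theorem pvTotalLenG_le_mem {p : String × List (List String)} {g : List (String × List (List String))}
    (h : p ∈ g) : pvTotalLen p.2 + 1 ≤ pvTotalLenG g := by
  induction g with
  | nil => simp at h
  | cons q rest ih =>
    rcases List.mem_cons.mp h with h | h
    · subst h; simp [pvTotalLenG]
    · have := ih h; simp [pvTotalLenG] at this ⊢; omega

theorem pvTotalLenG_addGroup (g : List (String × List (List String))) (w : String) (t : List String) :
    pvTotalLenG (addGroup g w t) ≤ pvTotalLenG g + (t.length + 2) := by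
  induction g with
  | nil =>
    cases t <;> simp [addGroup, pvTotalLenG, pvTotalLen]
  | cons q rest ih =>
    cases q with
    | mk k ts =>
      simp only [addGroup]
      split
      · cases t <;> simp [pvTotalLenG, pvTotalLen] <;> omega
      · simp [pvTotalLenG] at ih ⊢; omega

theorem pvTotalLenG_foldl (seqs : List (List String)) (g : List (String × List (List String))) :
    pvTotalLenG (seqs.foldl groupStep g) ≤ pvTotalLenG g + pvTotalLen seqs := by
  induction seqs generalizing g with
  | nil => simp [pvTotalLen]
  | cons s rest ih =>
    cases s with
    | nil =>
      have := ih g; simp [pvTotalLen, groupStep] at this ⊢; omega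
    | cons w t =>
      have h1 := ih (addGroup g w t)
      have h2 := pvTotalLenG_addGroup g w t
      simp [pvTotalLen, groupStep] at h1 ⊢; omega

theorem pvTotalLen_mem_groupByFirst {p : String × List (List String)} {seqs : List (List String)}
    (h : p ∈ groupByFirst seqs) : pvTotalLen p.2 < pvTotalLen seqs := by
  have h1 := pvTotalLenG_le_mem h
  have h2 := pvTotalLenG_foldl seqs []
  simp [pvTotalLenG, groupByFirst] at *
  omega

-- render(seqs): group by first token, render each group's tails, combine the branches
def render (seqs : List (List String)) : String :=
  if seqs.isEmpty then ""
  else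
    combineBranches ((groupByFirst seqs).attach.map (fun p =>
      let sub := render p.1.2
      if sub = "" then p.1.1 else PySem.Str.strip (p.1.1 ++ " " ++ sub)))
termination_by pvTotalLen seqs
decreasing_by exact pvTotalLen_mem_groupByFirst p.2

def generateBaseGrammar_alt (sentences : List String) : String :=
  render ((sentences.map PySem.Str.split₀).filter (fun t => !t.isEmpty))

-- ===== PRECONDITION & SPEC =====
def Spec_generateBaseGrammar (sentences : List String) (out : String) : Prop := out = generateBaseGrammar_alt sentences
instance (sentences : List String) (out : String) : Decidable (Spec_generateBaseGrammar sentences out) := by unfold Spec_generateBaseGrammar; infer_instance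

-- ===== CLAIM (what is proved, stated in full; the proofs are below) =====
def Claim_equal_generateBaseGrammar : Prop := ∀ (sentences : List String), Dom_generateBaseGrammar sentences → Spec_generateBaseGrammar sentences (generateBaseGrammar sentences)

-- ===== LEMMAS AND PROOFS =====

def treeForest : PvTree → PvForest
  | PvTree.mk _ f => f

def genGrammarF (f : PvForest) : String :=
  match f with
  | PvForest.nil => ""
  | PvForest.cons w t rest => combineBranches (branchesOf (PvForest.cons w t rest))

theorem genGrammar_eq_genGrammarF (e : Bool) (f : PvForest) :
    genGrammar (PvTree.mk e f) = genGrammarF f := by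
  cases f <;> rfl

def forestStep (f : PvForest) (s : List String) : PvForest :=
  match s with
  | [] => f
  | w :: ws => updateChild f w (fun t => addWords t ws)

def rootForest (seqs : List (List String)) : PvForest :=
  seqs.foldl forestStep PvForest.nil

theorem treeForest_addWords (t : PvTree) (s : List String) :
    treeForest (addWords t s) = forestStep (treeForest t) s := by
  cases t with | mk e f => cases s <;> rfl

theorem treeForest_foldl (sentences : List String) (t : PvTree) :
    treeForest (sentences.foldl (fun root s => addWords root (PySem.Str.split₀ s)) t)
      = (sentences.map PySem.Str.split₀).foldl forestStep (treeForest t) := by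
  induction sentences generalizing t with
  | nil => rfl
  | cons s rest ih => simp [List.foldl_cons, ih, treeForest_addWords]

theorem foldl_forestStep_filter (seqs : List (List String)) (f : PvForest) :
    seqs.foldl forestStep f = (seqs.filter (fun t => !t.isEmpty)).foldl forestStep f := by
  induction seqs generalizing f with
  | nil => rfl
  | cons s rest ih => cases s <;> simp [List.foldl_cons, forestStep, ih]

inductive PvRel : PvForest → List (String × List (List String)) → Prop where
  | nil : PvRel PvForest.nil []
  | cons (w : String) (t : PvTree) (f : PvForest) (ts : List (List String)) (l : List (String × List (List String)))
      (h1 : treeForest t = rootForest ts) (h2 : PvRel f l) : PvRel (PvForest.cons w t f) ((w, ts) :: l)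

theorem pvRel_addGroup {f : PvForest} {l : List (String × List (List String))}
    (h : PvRel f l) (w : String) (t : List String) :
    PvRel (updateChild f w (fun tr => addWords tr t)) (addGroup l w t) := by
  induction h with
  | nil =>
    simp only [updateChild, addGroup]
    refine PvRel.cons w _ _ _ _ ?_ PvRel.nil
    cases t with
    | nil => rfl
    | cons w' r => rfl
  | cons w' t' f' ts l h1 h2 ih =>
    simp only [updateChild, addGroup]
    split
    · refine PvRel.cons w' _ _ _ _ ?_ h2
      cases t with
      | nil =>
        cases t' with | mk e tf => simpa [addWords, treeForest] using h1
      | cons w'' r =>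
        cases t' with
        | mk e tf =>
          have hstep : rootForest (ts ++ [w'' :: r]) = forestStep (rootForest ts) (w'' :: r) := by
            simp [rootForest, List.foldl_append]
          simp only [addWords, treeForest, List.isEmpty_cons, Bool.false_eq_true, if_false, hstep, ← h1]
          rfl
    · exact PvRel.cons w' t' _ ts _ h1 ih

theorem pvRel_step {f : PvForest} {l : List (String × List (List String))}
    (h : PvRel f l) (s : List String) : PvRel (forestStep f s) (groupStep l s) := by
  cases s with
  | nil => exact h
  | cons w t => exact pvRel_addGroup h w t

theorem pvRel_foldl {f : PvForest} {l : List (String × List (List String))}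
    (h : PvRel f l) (seqs : List (List String)) :
    PvRel (seqs.foldl forestStep f) (seqs.foldl groupStep l) := by
  induction seqs generalizing f l with
  | nil => exact h
  | cons s rest ih => exact ih (pvRel_step h s)

theorem pvRel_nil_iff {f : PvForest} {l : List (String × List (List String))}
    (h : PvRel f l) : f = PvForest.nil ↔ l = [] := by
  cases h <;> simp

theorem addGroup_ne_nil (g : List (String × List (List String))) (w : String) (t : List String) :
    addGroup g w t ≠ [] := by
  cases g with
  | nil => simp [addGroup]
  | cons p rest => cases p with | mk k ts => simp only [addGroup]; split <;> simp

theorem foldl_groupStep_ne_nil (seqs : List (List String)) (g : List (String × List (List String)))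
    (hg : g ≠ []) : seqs.foldl groupStep g ≠ [] := by
  induction seqs generalizing g with
  | nil => exact hg
  | cons s rest ih =>
    cases s with
    | nil => exact ih g hg
    | cons w t => exact ih _ (addGroup_ne_nil g w t)

theorem mem_addGroup_tails {p : String × List (List String)} {g : List (String × List (List String))}
    {w : String} {t : List String} (hg : ∀ q ∈ g, [] ∉ q.2) (h : p ∈ addGroup g w t) : [] ∉ p.2 := by
  induction g with
  | nil =>
    simp only [addGroup, List.mem_singleton] at h
    subst h
    cases t <;> simp
  | cons q rest ih =>
    cases q with
    | mk k ts =>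
      simp only [addGroup] at h
      split at h
      · rcases List.mem_cons.mp h with h | h
        · subst h
          have hk := hg (k, ts) (by simp)
          cases t with
          | nil => simpa using hk
          | cons a r => simp at hk ⊢; exact hk
        · exact hg p (by simp [h])
      · rcases List.mem_cons.mp h with h | h
        · subst h; exact hg (k, ts) (by simp)
        · exact ih (fun q hq => hg q (by simp [hq])) h

theorem mem_foldl_groupStep_tails {p : String × List (List String)} {seqs : List (List String)}
    {g : List (String × List (List String))} (hg : ∀ q ∈ g, [] ∉ q.2)
    (h : p ∈ seqs.foldl groupStep g) : [] ∉ p.2 := by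
  induction seqs generalizing g with
  | nil => exact hg p h
  | cons s rest ih =>
    cases s with
    | nil => exact ih hg h
    | cons w t => exact ih (fun q hq => mem_addGroup_tails hg hq) h

theorem pvMapAttach {α β : Type} (l : List α) (f : α → β) :
    l.attach.map (fun p => f p.1) = l.map f := by
  induction l with
  | nil => rfl
  | cons a l ih => simp [List.attach_cons, List.map_map, Function.comp]

theorem render_eq (seqs : List (List String)) :
    render seqs = if seqs.isEmpty then ""
      else combineBranches ((groupByFirst seqs).map (fun p =>
        let sub := render p.2
        if sub = "" then p.1 else PySem.Str.strip (p.1 ++ " " ++ sub))) := by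
  rw [render]
  refine congrArg (fun b => if seqs.isEmpty then "" else combineBranches b) ?_
  exact pvMapAttach (groupByFirst seqs) (fun q =>
    if render q.2 = "" then q.1 else PySem.Str.strip (q.1 ++ " " ++ render q.2))

theorem branchesOf_rel {f : PvForest} {l : List (String × List (List String))}
    (h : PvRel f l) (hl : ∀ p ∈ l, genGrammarF (rootForest p.2) = render p.2) :
    branchesOf f = l.map (fun p =>
      let sub := render p.2
      if sub = "" then p.1 else PySem.Str.strip (p.1 ++ " " ++ sub)) := by
  induction h with
  | nil => rfl
  | cons w t f ts l h1 h2 ih =>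
    have hhead : genGrammar t = render ts := by
      cases t with
      | mk e tf =>
        rw [genGrammar_eq_genGrammarF]
        have : tf = rootForest ts := h1
        rw [this]
        exact hl (w, ts) (by simp)
    simp only [branchesOf, List.map_cons, hhead]
    congr 1
    exact ih (fun p hp => hl p (by simp [hp]))

theorem main_render (n : Nat) : ∀ seqs : List (List String), pvTotalLen seqs ≤ n →
    (∀ s ∈ seqs, s ≠ []) → genGrammarF (rootForest seqs) = render seqs := by
  induction n with
  | zero =>
    intro seqs hle _
    have hnil : seqs = [] := by
      cases seqs with
      | nil => rfl
      | cons s r => simp [pvTotalLen] at hle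
    subst hnil
    rw [render_eq]
    rfl
  | succ n ih =>
    intro seqs hle hne
    by_cases hs : seqs = []
    · subst hs; rw [render_eq]; rfl
    · have hie : seqs.isEmpty = false := by simpa using hs
      rw [render_eq, hie]
      simp only [Bool.false_eq_true, if_false]
      have hrel : PvRel (rootForest seqs) (groupByFirst seqs) := pvRel_foldl PvRel.nil seqs
      have hgne : groupByFirst seqs ≠ [] := by
        obtain ⟨s, rest, rfl⟩ := List.exists_cons_of_ne_nil hs
        have hsne := hne s (by simp)
        cases s with
        | nil => exact absurd rfl hsne
        | cons w t =>
          have : groupByFirst ((w :: t) :: rest) = rest.foldl groupStep (addGroup [] w t) := rfl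
          rw [this]
          exact foldl_groupStep_ne_nil rest _ (addGroup_ne_nil [] w t)
      have hfne : rootForest seqs ≠ PvForest.nil := fun hc => hgne ((pvRel_nil_iff hrel).mp hc)
      have hl : ∀ p ∈ groupByFirst seqs, genGrammarF (rootForest p.2) = render p.2 := by
        intro p hp
        have hlt := pvTotalLen_mem_groupByFirst hp
        have htails : [] ∉ p.2 := mem_foldl_groupStep_tails (by simp) hp
        exact ih p.2 (by omega) (fun s hsm hc => htails (hc ▸ hsm))
      have hb := branchesOf_rel hrel hl
      cases hf : rootForest seqs with
      | nil => exact absurd hf hfne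
      | cons w t rest =>
        have : genGrammarF (PvForest.cons w t rest) = combineBranches (branchesOf (PvForest.cons w t rest)) := rfl
        rw [this, ← hf, hb]

-- ===== VERDICT (by name: the statement is the Claim_ definition above) =====
theorem generateBaseGrammar_spec : Claim_equal_generateBaseGrammar := by
  intro sentences _
  unfold Spec_generateBaseGrammar generateBaseGrammar generateBaseGrammar_alt
  set T := sentences.foldl (fun root s => addWords root (PySem.Str.split₀ s)) (PvTree.mk false PvForest.nil) with hT
  have h1 : genGrammar T = genGrammarF (treeForest T) := by
    cases T with | mk e f => exact genGrammar_eq_genGrammarF e f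
  have h2 : treeForest T = rootForest ((sentences.map PySem.Str.split₀).filter (fun t => !t.isEmpty)) := by
    rw [hT, treeForest_foldl]
    exact foldl_forestStep_filter (sentences.map PySem.Str.split₀) PvForest.nil
  rw [h1, h2]
  exact main_render _ _ le_rfl (by
    intro s hsm
    have := (List.mem_filter.mp hsm).2
    simpa using this)
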